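-- pv_equiv track=rewrite | github.com/kang-s-h/Baeck-Joon | 백준/Silver/16173. 점프왕 쩰리 （Small）/점프왕 쩰리 （Small）.py | can_reach_goal
-- ===== SOURCE A (Python) =====
-- from collections import deque
--
-- def can_reach_goal(board):
--     n = len(board)
--     visited = [[False] * n for _ in range(n)]
--     queue = deque()
--     queue.append((0, 0))
--     visited[0][0] = True
--
--     while queue:
--         x, y = queue.popleft()
--         jump = board[x][y]
--
--         if x == n - 1 and y == n - 1:
--             return True
--
--         nx, ny = x, y + jump
--         if 0 <= ny < n and not visited[nx][ny]:
--             visited[nx][ny] = True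
--             queue.append((nx, ny))
--
--         nx, ny = x + jump, y
--         if 0 <= nx < n and not visited[nx][ny]:
--             visited[nx][ny] = True
--             queue.append((nx, ny))
--
--     return False
-- ===== SOURCE B (Python) =====
-- def can_reach_goal(board):
--     n = len(board)
--     reach = [[False] * n for _ in range(n)]
--     reach[0][0] = True
--     while True:
--         new = [row[:] for row in reach]
--         for x in range(n):
--             for y in range(n):
--                 if new[x][y]:
--                     jump = board[x][y]
--                     if 0 <= y + jump < n:
--                         new[x][y + jump] = True
--                     if 0 <= x + jump < n:
--                         new[x + jump][y] = True
--         if new == reach: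
--             break
--         reach = new
--     return reach[n - 1][n - 1]
-- ===== Notes on version B (the rewrite author's own statement) =====
-- stated objective: alternative
-- what changed: Replaces the deque-based BFS with queueless round-based relaxation: repeatedly sweep the whole grid marking the one-jump successors of every reachable cell until the reachable set stabilises, then read the goal cell.
-- outside the precondition, e.g. on can_reach_goal([[1, 9], [5]]): A returns False, B returns False; on can_reach_goal([[2, 9, 2], [], [-1, 9, 7]]): A returns True, B raises IndexError
import Mathlib
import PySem

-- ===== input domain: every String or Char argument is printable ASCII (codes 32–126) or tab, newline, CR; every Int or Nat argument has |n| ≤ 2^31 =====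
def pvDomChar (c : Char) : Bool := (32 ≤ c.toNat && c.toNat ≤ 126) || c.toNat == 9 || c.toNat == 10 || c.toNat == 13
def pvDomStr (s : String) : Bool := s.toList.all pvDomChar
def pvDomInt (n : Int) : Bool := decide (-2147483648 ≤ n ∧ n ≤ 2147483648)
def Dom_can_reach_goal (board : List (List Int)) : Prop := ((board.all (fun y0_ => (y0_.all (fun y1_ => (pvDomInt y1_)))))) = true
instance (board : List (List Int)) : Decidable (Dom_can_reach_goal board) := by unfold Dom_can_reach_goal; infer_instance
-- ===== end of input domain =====

-- B replaces A's deque-based BFS by queueless fixpoint sweeps over the whole grid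
-- (round-based relaxation) until the reachable set stabilises; equal return values on
-- nonempty square boards.

-- shared 2D-grid helpers (list-of-lists indexing, exactly as both Pythons index their grids)
def mkGrid (n : Nat) : List (List Bool) := List.replicate n (List.replicate n false)
def getCell (board : List (List Int)) (x y : Nat) : Int := (board.getD x []).getD y 0
def get2 (g : List (List Bool)) (x y : Nat) : Bool := (g.getD x []).getD y false
def set2 (g : List (List Bool)) (x y : Nat) : List (List Bool) := g.set x ((g.getD x []).set y true)

-- ===== PORT A =====
-- Python's while-queue loop as fuel recursion (2*n*n+2 is proved sufficient below: each
-- iteration pops one cell and every enqueue marks a fresh visited cell).  Coordinates of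
-- enqueued cells are always nonnegative (guarded by 0 <= ·), so they are stored as Nat.
def bfsA (board : List (List Int)) (n : Nat) : Nat → List (Nat × Nat) → List (List Bool) → Bool
  | 0, _, _ => false
  | _ + 1, [], _ => false
  | fuel + 1, (x, y) :: rest, vis =>
    let jump := getCell board x y
    if x = n - 1 ∧ y = n - 1 then true
    else
      let ny : Int := (y : Int) + jump
      let s1 := if 0 ≤ ny ∧ ny < (n : Int) ∧ get2 vis x ny.toNat = false
                then (rest ++ [(x, ny.toNat)], set2 vis x ny.toNat) else (rest, vis)
      let nx : Int := (x : Int) + jump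
      let s2 := if 0 ≤ nx ∧ nx < (n : Int) ∧ get2 s1.2 nx.toNat y = false
                then (s1.1 ++ [(nx.toNat, y)], set2 s1.2 nx.toNat y) else s1
      bfsA board n fuel s2.1 s2.2

def can_reach_goal (board : List (List Int)) : Bool :=
  let n := board.length
  bfsA board n (2 * n * n + 2) [(0, 0)] (set2 (mkGrid n) 0 0)

-- ===== PORT B =====
-- one cell of Source B's inner loop body
def sweepCell (board : List (List Int)) (n : Nat) (g : List (List Bool)) (x y : Nat) : List (List Bool) :=
  if get2 g x y then
    let jump := getCell board x y
    let ny : Int := (y : Int) + jump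
    let g1 := if 0 ≤ ny ∧ ny < (n : Int) then set2 g x ny.toNat else g
    let nx : Int := (x : Int) + jump
    if 0 ≤ nx ∧ nx < (n : Int) then set2 g1 nx.toNat y else g1
  else g

-- the two nested for-loops of Source B
def sweep (board : List (List Int)) (n : Nat) (g : List (List Bool)) : List (List Bool) :=
  (List.range n).foldl (fun gx x => (List.range n).foldl (fun gy y => sweepCell board n gy x y) gx) g

-- Source B's 'while True: … if new == reach: break' loop; fuel n*n+1 is proved sufficient
-- below (each non-final round strictly enlarges the marked set of ≤ n*n cells).
def iterSweep (board : List (List Int)) (n : Nat) : Nat → List (List Bool) → List (List Bool)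
  | 0, g => g
  | fuel + 1, g =>
    let g' := sweep board n g
    if g' = g then g else iterSweep board n fuel g'

def can_reach_goal_alt (board : List (List Int)) : Bool :=
  let n := board.length
  let fix := iterSweep board n (n * n + 1) (set2 (mkGrid n) 0 0)
  get2 fix (n - 1) (n - 1)

-- ===== PRECONDITION & SPEC =====
-- Pre_ admits the boards on which A provably cannot raise: a nonempty board with a
-- nonempty first row, and in addition either every row has at least n = len(board)
-- entries (the puzzle's n x n grid, possibly wider — no cell the BFS pops is missing),
-- or n = 1 (the start is the goal), or the start jump board[0][0] leaves [1, n-1] (the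
-- search dies after reading only board[0][0]).  On the remaining short-row boards A
-- raises IndexError whenever its BFS touches a missing cell and only accidentally
-- returns when it does not; B (which keeps propagating after the goal is seen) may even
-- raise where A returned.
def Pre_can_reach_goal (board : List (List Int)) : Prop :=
  board ≠ [] ∧ board.getD 0 [] ≠ [] ∧
    ((∀ row ∈ board, board.length ≤ row.length) ∨ board.length = 1 ∨
     (board.getD 0 []).getD 0 0 ≤ 0 ∨ (board.length : Int) ≤ (board.getD 0 []).getD 0 0)
instance (board : List (List Int)) : Decidable (Pre_can_reach_goal board) := by
  unfold Pre_can_reach_goal; infer_instance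

def pvWitness_can_reach_goal : List (List Int) := [[1, 1], [1, 0]]

def Spec_can_reach_goal (board : List (List Int)) (out : Bool) : Prop := out = can_reach_goal_alt board
instance (board : List (List Int)) (out : Bool) : Decidable (Spec_can_reach_goal board out) := by unfold Spec_can_reach_goal; infer_instance

-- ===== CLAIM (what is proved, stated in full; the proofs are below) =====
def Claim_equal_can_reach_goal : Prop := ∀ (board : List (List Int)), Dom_can_reach_goal board → Pre_can_reach_goal board → Spec_can_reach_goal board (can_reach_goal board)

-- ===== LEMMAS AND PROOFS =====

-- the jump relation A explores: one rightward/downward-by-board[x][y] move between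
-- in-bounds cells whose source is not the goal (A returns before expanding the goal)
def Step (board : List (List Int)) (n : Nat) (p q : Nat × Nat) : Prop :=
  p.1 < n ∧ p.2 < n ∧ q.1 < n ∧ q.2 < n ∧ p ≠ (n - 1, n - 1) ∧
  ((q.1 = p.1 ∧ (q.2 : Int) = (p.2 : Int) + getCell board p.1 p.2) ∨
   ((q.1 : Int) = (p.1 : Int) + getCell board p.1 p.2 ∧ q.2 = p.2))

-- the same relation without the goal-source restriction (what B's sweeps follow)
def StepF (board : List (List Int)) (n : Nat) (p q : Nat × Nat) : Prop :=
  p.1 < n ∧ p.2 < n ∧ q.1 < n ∧ q.2 < n ∧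
  ((q.1 = p.1 ∧ (q.2 : Int) = (p.2 : Int) + getCell board p.1 p.2) ∨
   ((q.1 : Int) = (p.1 : Int) + getCell board p.1 p.2 ∧ q.2 = p.2))

def Reach (board : List (List Int)) (n : Nat) (q : Nat × Nat) : Prop :=
  Relation.ReflTransGen (Step board n) (0, 0) q

def ReachF (board : List (List Int)) (n : Nat) (q : Nat × Nat) : Prop :=
  Relation.ReflTransGen (StepF board n) (0, 0) q

def Shape (n : Nat) (g : List (List Bool)) : Prop :=
  g.length = n ∧ ∀ i, i < n → (g.getD i []).length = n

def Vset (n : Nat) (g : List (List Bool)) : Finset (Nat × Nat) :=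
  (Finset.range n ×ˢ Finset.range n).filter (fun p => get2 g p.1 p.2 = true)

-- grid lemmas
lemma getD_oob {α : Type} {l : List α} {i : Nat} (d : α) (h : l.length ≤ i) :
    l.getD i d = d := by
  simp [List.getD_eq_getElem?_getD, List.getElem?_eq_none h]

lemma getD_set_self {α : Type} {l : List α} {i : Nat} (r : α) (d : α) (h : i < l.length) :
    (l.set i r).getD i d = r := by
  rw [List.getD_eq_getElem?_getD, List.getElem?_set_self h]; rfl

lemma getD_set_ne {α : Type} {l : List α} {i j : Nat} (r : α) (d : α) (h : i ≠ j) :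
    (l.set i r).getD j d = l.getD j d := by
  rw [List.getD_eq_getElem?_getD, List.getElem?_set_ne h, ← List.getD_eq_getElem?_getD]

lemma get2_true_lt {g : List (List Bool)} {x y : Nat} (h : get2 g x y = true) :
    x < g.length ∧ y < (g.getD x []).length := by
  by_cases hx : x < g.length
  · refine ⟨hx, ?_⟩
    by_cases hy : y < (g.getD x []).length
    · exact hy
    · rw [get2, getD_oob false (Nat.le_of_not_lt hy)] at h; exact absurd h (by simp)
  · rw [get2, getD_oob [] (Nat.le_of_not_lt hx)] at h
    simp [List.getD] at h

lemma get2_set2_self {g : List (List Bool)} {x y : Nat}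
    (hx : x < g.length) (hy : y < (g.getD x []).length) :
    get2 (set2 g x y) x y = true := by
  rw [get2, set2, getD_set_self _ _ hx, getD_set_self _ _ hy]

lemma get2_set2_ne {g : List (List Bool)} {x y a b : Nat} (h : ¬(a = x ∧ b = y)) :
    get2 (set2 g x y) a b = get2 g a b := by
  rw [get2, get2, set2]
  by_cases hax : x = a
  · subst hax
    have hby : y ≠ b := fun hb => h ⟨rfl, hb.symm⟩
    by_cases hx : x < g.length
    · rw [getD_set_self _ _ hx, getD_set_ne _ _ hby]
    · rw [List.set_eq_of_length_le (by omega)]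
  · rw [getD_set_ne _ _ hax]

lemma get2_set2_mono {g : List (List Bool)} {x y a b : Nat} (h : get2 g a b = true) :
    get2 (set2 g x y) a b = true := by
  by_cases hab : a = x ∧ b = y
  · obtain ⟨rfl, rfl⟩ := hab
    obtain ⟨h1, h2⟩ := get2_true_lt h
    exact get2_set2_self h1 h2
  · rw [get2_set2_ne hab]; exact h

lemma shape_set2 {n : Nat} {g : List (List Bool)} (hs : Shape n g) (x y : Nat) :
    Shape n (set2 g x y) := by
  obtain ⟨h1, h2⟩ := hs
  refine ⟨by simpa [set2] using h1, fun i hi => ?_⟩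
  by_cases hix : x = i
  · subst hix
    by_cases hx : x < g.length
    · rw [set2, getD_set_self _ _ hx]
      simpa using h2 x hi
    · rw [set2, List.set_eq_of_length_le (by omega)]; exact h2 x hi
  · rw [set2, getD_set_ne _ _ hix]
    exact h2 i hi

lemma shape_mkGrid (n : Nat) : Shape n (mkGrid n) := by
  refine ⟨by simp [mkGrid], fun i hi => ?_⟩
  rw [mkGrid, List.getD_eq_getElem?_getD, List.getElem?_replicate_of_lt hi]
  simp

lemma get2_shape_lt {n : Nat} {g : List (List Bool)} (hs : Shape n g) {x y : Nat}
    (h : get2 g x y = true) : x < n ∧ y < n := by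
  obtain ⟨h1, h2⟩ := get2_true_lt h
  have hx : x < n := hs.1 ▸ h1
  exact ⟨hx, (hs.2 x hx) ▸ h2⟩

lemma Vset_mem {n : Nat} {g : List (List Bool)} {p : Nat × Nat} :
    p ∈ Vset n g ↔ p.1 < n ∧ p.2 < n ∧ get2 g p.1 p.2 = true := by
  simp [Vset, Finset.mem_filter, Finset.mem_product, and_assoc]

lemma Vset_card_le (n : Nat) (g : List (List Bool)) : (Vset n g).card ≤ n * n := by
  calc (Vset n g).card ≤ ((Finset.range n) ×ˢ (Finset.range n)).card :=
        Finset.card_le_card (Finset.filter_subset _ _)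
    _ = n * n := by simp

lemma Vset_set2 {n : Nat} {g : List (List Bool)} {x y : Nat} (hs : Shape n g)
    (hx : x < n) (hy : y < n) :
    Vset n (set2 g x y) = insert (x, y) (Vset n g) := by
  ext p
  rw [Vset_mem, Finset.mem_insert, Vset_mem]
  constructor
  · rintro ⟨h1, h2, h3⟩
    by_cases hp : p.1 = x ∧ p.2 = y
    · left; exact Prod.ext hp.1 hp.2
    · right; exact ⟨h1, h2, by rwa [get2_set2_ne hp] at h3⟩
  · rintro (rfl | ⟨h1, h2, h3⟩)
    · exact ⟨hx, hy, get2_set2_self (hs.1 ▸ hx) ((hs.2 x hx) ▸ hy)⟩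
    · exact ⟨h1, h2, get2_set2_mono h3⟩

lemma grid_ext {n : Nat} {g g' : List (List Bool)} (hs : Shape n g) (hs' : Shape n g')
    (h : ∀ a b, a < n → b < n → get2 g a b = get2 g' a b) : g = g' := by
  apply List.ext_getElem (by rw [hs.1, hs'.1])
  intro i h1 h2
  have hi : i < n := hs.1 ▸ h1
  have hrow : (g.getD i []) = g[i] := by
    rw [List.getD_eq_getElem?_getD, List.getElem?_eq_getElem h1]; rfl
  have hrow' : (g'.getD i []) = g'[i] := by
    rw [List.getD_eq_getElem?_getD, List.getElem?_eq_getElem h2]; rfl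
  apply List.ext_getElem (by rw [← hrow, ← hrow', hs.2 i hi, hs'.2 i hi])
  intro j j1 j2
  have hj : j < n := by rw [← hrow, hs.2 i hi] at j1; exact j1
  have := h i j hi hj
  rw [get2, get2, hrow, hrow', List.getD_eq_getElem?_getD, List.getD_eq_getElem?_getD,
    List.getElem?_eq_getElem j1, List.getElem?_eq_getElem j2] at this
  simpa using this

lemma get2_set2_cases {g : List (List Bool)} {x y a b : Nat}
    (h : get2 (set2 g x y) a b = true) : (a = x ∧ b = y) ∨ get2 g a b = true := by
  by_cases hab : a = x ∧ b = y
  · exact Or.inl hab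
  · right; rwa [get2_set2_ne hab] at h

lemma get2_mkGrid (n x y : Nat) : get2 (mkGrid n) x y = false := by
  rw [get2, mkGrid]
  by_cases hx : x < n
  · have hrow : (List.replicate n (List.replicate n false)).getD x [] = List.replicate n false := by
      rw [List.getD_eq_getElem?_getD]; simp [hx]
    rw [hrow, List.getD_eq_getElem?_getD]
    by_cases hy : y < n
    · simp [hy]
    · simp [hy]
  · rw [getD_oob [] (by simpa using Nat.le_of_not_lt hx)]
    simp [List.getD]

-- BFS invariant
def InvA (board : List (List Int)) (n : Nat) (q : List (Nat × Nat)) (vis : List (List Bool)) : Prop :=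
  Shape n vis ∧ get2 vis 0 0 = true ∧
  (∀ p ∈ q, get2 vis p.1 p.2 = true) ∧
  (∀ p : Nat × Nat, get2 vis p.1 p.2 = true → Reach board n p) ∧
  (∀ p : Nat × Nat, get2 vis p.1 p.2 = true → p ∉ q →
      p ≠ (n - 1, n - 1) ∧ ∀ s, Step board n p s → get2 vis s.1 s.2 = true)

def Gle (g g' : List (List Bool)) : Prop := ∀ a b, get2 g a b = true → get2 g' a b = true

lemma gle_refl (g : List (List Bool)) : Gle g g := fun _ _ h => h

lemma gle_trans {g1 g2 g3 : List (List Bool)} (h1 : Gle g1 g2) (h2 : Gle g2 g3) : Gle g1 g3 :=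
  fun a b h => h2 a b (h1 a b h)

lemma visit_facts {board : List (List Int)} {n : Nat} (vis : List (List Bool)) (c : Nat × Nat)
    (hs : Shape n vis) (hreach : ∀ p : Nat × Nat, get2 vis p.1 p.2 = true → Reach board n p)
    (hcr : Reach board n c) (hb1 : c.1 < n) (hb2 : c.2 < n)
    (hnew : get2 vis c.1 c.2 = false) :
    Shape n (set2 vis c.1 c.2) ∧ Gle vis (set2 vis c.1 c.2) ∧
    (∀ p : Nat × Nat, get2 (set2 vis c.1 c.2) p.1 p.2 = true → p = c ∨ get2 vis p.1 p.2 = true) ∧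
    (∀ p : Nat × Nat, get2 (set2 vis c.1 c.2) p.1 p.2 = true → Reach board n p) ∧
    (Vset n (set2 vis c.1 c.2)).card = (Vset n vis).card + 1 ∧
    get2 (set2 vis c.1 c.2) c.1 c.2 = true := by
  have hcases : ∀ p : Nat × Nat, get2 (set2 vis c.1 c.2) p.1 p.2 = true →
      p = c ∨ get2 vis p.1 p.2 = true := by
    intro p hp
    rcases get2_set2_cases hp with ⟨h1, h2⟩ | h
    · exact Or.inl (Prod.ext h1 h2)
    · exact Or.inr h
  refine ⟨shape_set2 hs c.1 c.2, fun a b h => get2_set2_mono h, hcases, ?_, ?_, ?_⟩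
  · intro p hp
    rcases hcases p hp with rfl | h
    · exact hcr
    · exact hreach p h
  · rw [Vset_set2 hs hb1 hb2, Prod.mk.eta,
      Finset.card_insert_of_notMem (fun hmem => by
        rw [Vset_mem] at hmem
        rw [hmem.2.2] at hnew
        exact absurd hnew (by simp))]
  · exact get2_set2_self (hs.1 ▸ hb1) (by rw [hs.2 c.1 hb1]; exact hb2)

lemma pair_ne_goal {n x y : Nat} (h : ¬(x = n - 1 ∧ y = n - 1)) : (x, y) ≠ (n - 1, n - 1) := by
  intro he
  rw [Prod.mk.injEq] at he
  exact h he

lemma bfsA_correct (board : List (List Int)) (n : Nat) (hn : 0 < n) :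
    ∀ fuel q vis, InvA board n q vis →
      q.length + 2 * (n * n - (Vset n vis).card) < fuel →
      (bfsA board n fuel q vis = true ↔ Reach board n (n - 1, n - 1)) := by
  intro fuel
  induction fuel with
  | zero => intro q vis _ h; omega
  | succ f ih =>
    intro q vis hinv hmu
    obtain ⟨hshape, hstart, hqvis, hreach, hclosed⟩ := hinv
    match q with
    | [] =>
      rw [bfsA]
      constructor
      · intro h; exact absurd h (by simp)
      · intro hR
        have hall : ∀ r : Nat × Nat, Reach board n r → get2 vis r.1 r.2 = true := by
          intro r hr
          induction hr with
          | refl => exact hstart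
          | tail hab hbc ih2 =>
            rename_i b c
            exact (hclosed b ih2 List.not_mem_nil).2 c hbc
        have hgoal := hall _ hR
        have := hclosed (n - 1, n - 1) hgoal List.not_mem_nil
        exact (this.1 rfl).elim
    | (x, y) :: rest =>
      have hxyvis : get2 vis x y = true := hqvis (x, y) List.mem_cons_self
      obtain ⟨hx, hy⟩ := get2_shape_lt hshape hxyvis
      have hxyreach : Reach board n (x, y) := hreach (x, y) hxyvis
      by_cases hgoal : x = n - 1 ∧ y = n - 1
      · simp only [bfsA]
        rw [if_pos hgoal]
        refine iff_of_true rfl ?_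
        obtain ⟨rfl, rfl⟩ := hgoal
        exact hxyreach
      · simp only [bfsA]
        rw [if_neg hgoal]
        have hnegoal : (x, y) ≠ (n - 1, n - 1) := pair_ne_goal hgoal
        set jmp := getCell board x y with hjmp
        set nyI : Int := (y : Int) + jmp with hnyI
        set nxI : Int := (x : Int) + jmp with hnxI
        have hcard_le := Vset_card_le n vis
        -- ===== phase 1 =====
        by_cases hc1 : 0 ≤ nyI ∧ nyI < (n : Int) ∧ get2 vis x nyI.toNat = false
        case pos =>
          rw [if_pos hc1]
          have hstep1 : Step board n (x, y) (x, nyI.toNat) :=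
            ⟨hx, hy, hx, by show nyI.toNat < n; omega, hnegoal,
              Or.inl ⟨rfl, by show ((nyI.toNat : Int)) = (y : Int) + getCell board x y; omega⟩⟩
          obtain ⟨hs1, hgle1, hcases1, hreach1, hcard1, hself1⟩ :=
            visit_facts vis (x, nyI.toNat) hshape hreach
              (Relation.ReflTransGen.tail hxyreach hstep1) hx (by show nyI.toNat < n; omega) hc1.2.2
          set v1 := set2 vis x nyI.toNat with hv1
          have hr1 : ∀ b : Nat, (b : Int) = nyI → b < n → get2 v1 x b = true := by
            intro b hb _
            have : b = nyI.toNat := by omega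
            rw [this]; exact hself1
          -- ===== phase 2 =====
          by_cases hc2 : 0 ≤ nxI ∧ nxI < (n : Int) ∧ get2 v1 nxI.toNat y = false
          case pos =>
            rw [if_pos hc2]
            simp only
            have hstep2 : Step board n (x, y) (nxI.toNat, y) :=
              ⟨hx, hy, by show nxI.toNat < n; omega, hy, hnegoal,
                Or.inr ⟨by show ((nxI.toNat : Int)) = (x : Int) + getCell board x y; omega, rfl⟩⟩
            obtain ⟨hs2, hgle2, hcases2, hreach2, hcard2, hself2⟩ :=
              visit_facts v1 (nxI.toNat, y) hs1 hreach1
                (Relation.ReflTransGen.tail hxyreach hstep2) (by show nxI.toNat < n; omega) hy hc2.2.2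
            set v2 := set2 v1 nxI.toNat y with hv2
            set q2 := rest ++ [(x, nyI.toNat)] ++ [(nxI.toNat, y)] with hq2
            have hglev : Gle vis v2 := gle_trans hgle1 hgle2
            have hd1 : ∀ a : Nat, (a : Int) = nxI → a < n → get2 v2 a y = true := by
              intro a ha _
              have : a = nxI.toNat := by omega
              rw [this]; exact hself2
            have hsucc : ∀ s, Step board n (x, y) s → get2 v2 s.1 s.2 = true := by
              rintro ⟨a, b⟩ ⟨_, _, ha, hb, _, hor⟩
              rcases hor with ⟨h1, h2⟩ | ⟨h1, h2⟩
              · subst h1; exact hgle2 _ b (hr1 b (by omega) hb)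
              · subst h2; exact hd1 a (by omega) ha
            refine ih q2 v2 ⟨hs2, hgle2 0 0 (hgle1 0 0 hstart), ?_, hreach2, ?_⟩ ?_
            · intro p hp
              rw [hq2] at hp
              simp only [List.mem_append, List.mem_singleton] at hp
              rcases hp with (hp | rfl) | rfl
              · exact hglev p.1 p.2 (hqvis p (List.mem_cons_of_mem _ hp))
              · exact hgle2 _ _ hself1
              · exact hself2
            · intro p hp hpq
              rcases hcases2 p hp with rfl | hp1
              · exact absurd (by rw [hq2]; simp) hpq
              rcases hcases1 p hp1 with rfl | hp0
              · exact absurd (by rw [hq2]; simp) hpq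
              by_cases hpxy : p = (x, y)
              · subst hpxy
                exact ⟨hnegoal, hsucc⟩
              · have hpnotq : p ∉ (x, y) :: rest := by
                  intro hmem
                  rcases List.mem_cons.mp hmem with h | hmem
                  · exact hpxy h
                  · exact hpq (by rw [hq2]; simp [hmem])
                obtain ⟨hne, hsuccold⟩ := hclosed p hp0 hpnotq
                exact ⟨hne, fun s hs => hglev s.1 s.2 (hsuccold s hs)⟩
            · have hlen : q2.length = rest.length + 2 := by rw [hq2]; simp
              have hlen0 : ((x, y) :: rest).length = rest.length + 1 := rfl
              have hc2le := Vset_card_le n v2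
              omega
          case neg =>
            rw [if_neg hc2]
            set q1 := rest ++ [(x, nyI.toNat)] with hq1
            have hd1 : ∀ a : Nat, (a : Int) = nxI → a < n → get2 v1 a y = true := by
              intro a ha han
              have hnf : ¬ get2 v1 nxI.toNat y = false := fun hf => hc2 ⟨by omega, by omega, hf⟩
              have hat : a = nxI.toNat := by omega
              rw [hat]
              rcases Bool.eq_false_or_eq_true (get2 v1 nxI.toNat y) with ht | hf
              · exact ht
              · exact absurd hf hnf
            have hsucc : ∀ s, Step board n (x, y) s → get2 v1 s.1 s.2 = true := by
              rintro ⟨a, b⟩ ⟨_, _, ha, hb, _, hor⟩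
              rcases hor with ⟨h1, h2⟩ | ⟨h1, h2⟩
              · subst h1; exact hr1 b (by omega) hb
              · subst h2; exact hd1 a (by omega) ha
            refine ih q1 v1 ⟨hs1, hgle1 0 0 hstart, ?_, hreach1, ?_⟩ ?_
            · intro p hp
              rw [hq1] at hp
              simp only [List.mem_append, List.mem_singleton] at hp
              rcases hp with hp | rfl
              · exact hgle1 p.1 p.2 (hqvis p (List.mem_cons_of_mem _ hp))
              · exact hself1
            · intro p hp hpq
              rcases hcases1 p hp with rfl | hp0
              · exact absurd (by rw [hq1]; simp) hpq
              by_cases hpxy : p = (x, y)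
              · subst hpxy
                exact ⟨hnegoal, hsucc⟩
              · have hpnotq : p ∉ (x, y) :: rest := by
                  intro hmem
                  rcases List.mem_cons.mp hmem with h | hmem
                  · exact hpxy h
                  · exact hpq (by rw [hq1]; simp [hmem])
                obtain ⟨hne, hsuccold⟩ := hclosed p hp0 hpnotq
                exact ⟨hne, fun s hs => hgle1 s.1 s.2 (hsuccold s hs)⟩
            · have hlen : q1.length = rest.length + 1 := by rw [hq1]; simp
              have hlen0 : ((x, y) :: rest).length = rest.length + 1 := rfl
              have hc1le := Vset_card_le n v1
              omega
        case neg =>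
          rw [if_neg hc1]
          have hr1 : ∀ b : Nat, (b : Int) = nyI → b < n → get2 vis x b = true := by
            intro b hb hbn
            have hnf : ¬ get2 vis x nyI.toNat = false := fun hf => hc1 ⟨by omega, by omega, hf⟩
            have hbt : b = nyI.toNat := by omega
            rw [hbt]
            rcases Bool.eq_false_or_eq_true (get2 vis x nyI.toNat) with ht | hf
            · exact ht
            · exact absurd hf hnf
          by_cases hc2 : 0 ≤ nxI ∧ nxI < (n : Int) ∧ get2 vis nxI.toNat y = false
          case pos =>
            rw [if_pos hc2]
            simp only
            have hstep2 : Step board n (x, y) (nxI.toNat, y) :=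
              ⟨hx, hy, by show nxI.toNat < n; omega, hy, hnegoal,
                Or.inr ⟨by show ((nxI.toNat : Int)) = (x : Int) + getCell board x y; omega, rfl⟩⟩
            obtain ⟨hs2, hgle2, hcases2, hreach2, hcard2, hself2⟩ :=
              visit_facts vis (nxI.toNat, y) hshape hreach
                (Relation.ReflTransGen.tail hxyreach hstep2) (by show nxI.toNat < n; omega) hy hc2.2.2
            set v2 := set2 vis nxI.toNat y with hv2
            set q2 := rest ++ [(nxI.toNat, y)] with hq2
            have hd1 : ∀ a : Nat, (a : Int) = nxI → a < n → get2 v2 a y = true := by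
              intro a ha _
              have : a = nxI.toNat := by omega
              rw [this]; exact hself2
            have hsucc : ∀ s, Step board n (x, y) s → get2 v2 s.1 s.2 = true := by
              rintro ⟨a, b⟩ ⟨_, _, ha, hb, _, hor⟩
              rcases hor with ⟨h1, h2⟩ | ⟨h1, h2⟩
              · subst h1; exact hgle2 _ b (hr1 b (by omega) hb)
              · subst h2; exact hd1 a (by omega) ha
            refine ih q2 v2 ⟨hs2, hgle2 0 0 hstart, ?_, hreach2, ?_⟩ ?_
            · intro p hp
              rw [hq2] at hp
              simp only [List.mem_append, List.mem_singleton] at hp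
              rcases hp with hp | rfl
              · exact hgle2 p.1 p.2 (hqvis p (List.mem_cons_of_mem _ hp))
              · exact hself2
            · intro p hp hpq
              rcases hcases2 p hp with rfl | hp0
              · exact absurd (by rw [hq2]; simp) hpq
              by_cases hpxy : p = (x, y)
              · subst hpxy
                exact ⟨hnegoal, hsucc⟩
              · have hpnotq : p ∉ (x, y) :: rest := by
                  intro hmem
                  rcases List.mem_cons.mp hmem with h | hmem
                  · exact hpxy h
                  · exact hpq (by rw [hq2]; simp [hmem])
                obtain ⟨hne, hsuccold⟩ := hclosed p hp0 hpnotq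
                exact ⟨hne, fun s hs => hgle2 s.1 s.2 (hsuccold s hs)⟩
            · have hlen : q2.length = rest.length + 1 := by rw [hq2]; simp
              have hlen0 : ((x, y) :: rest).length = rest.length + 1 := rfl
              have hc2le := Vset_card_le n v2
              omega
          case neg =>
            rw [if_neg hc2]
            have hd1 : ∀ a : Nat, (a : Int) = nxI → a < n → get2 vis a y = true := by
              intro a ha han
              have hnf : ¬ get2 vis nxI.toNat y = false := fun hf => hc2 ⟨by omega, by omega, hf⟩
              have hat : a = nxI.toNat := by omega
              rw [hat]
              rcases Bool.eq_false_or_eq_true (get2 vis nxI.toNat y) with ht | hf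
              · exact ht
              · exact absurd hf hnf
            have hsucc : ∀ s, Step board n (x, y) s → get2 vis s.1 s.2 = true := by
              rintro ⟨a, b⟩ ⟨_, _, ha, hb, _, hor⟩
              rcases hor with ⟨h1, h2⟩ | ⟨h1, h2⟩
              · subst h1; exact hr1 b (by omega) hb
              · subst h2; exact hd1 a (by omega) ha
            refine ih rest vis ⟨hshape, hstart, ?_, hreach, ?_⟩ ?_
            · intro p hp
              exact hqvis p (List.mem_cons_of_mem _ hp)
            · intro p hp hpq
              by_cases hpxy : p = (x, y)
              · subst hpxy
                exact ⟨hnegoal, hsucc⟩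
              · have hpnotq : p ∉ (x, y) :: rest := by
                  intro hmem
                  rcases List.mem_cons.mp hmem with h | hmem
                  · exact hpxy h
                  · exact hpq hmem
                exact hclosed p hp hpnotq
            · have hlen0 : ((x, y) :: rest).length = rest.length + 1 := rfl
              omega

-- sweep lemmas
lemma gle_foldl {α : Type} {f : List (List Bool) → α → List (List Bool)}
    (hf : ∀ g c, Gle g (f g c)) : ∀ (l : List α) (g), Gle g (l.foldl f g) := by
  intro l
  induction l with
  | nil => intro g; exact gle_refl g
  | cons c t ih => intro g; exact gle_trans (hf g c) (ih (f g c))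

lemma foldl_preserve {α : Type} {P : List (List Bool) → Prop}
    {f : List (List Bool) → α → List (List Bool)}
    (hf : ∀ g c, P g → P (f g c)) : ∀ (l : List α) (g), P g → P (l.foldl f g) := by
  intro l
  induction l with
  | nil => intro g hg; exact hg
  | cons c t ih => intro g hg; exact ih (f g c) (hf g c hg)

lemma sweepCell_gle (board : List (List Int)) (n : Nat) (g : List (List Bool)) (x y : Nat) :
    Gle g (sweepCell board n g x y) := by
  intro a b h
  simp only [sweepCell]
  split
  · split <;> split <;> first
      | exact get2_set2_mono (get2_set2_mono h)
      | exact get2_set2_mono h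
      | exact h
  · exact h

lemma sweep_gle (board : List (List Int)) (n : Nat) (g : List (List Bool)) :
    Gle g (sweep board n g) := by
  exact gle_foldl (fun g x => gle_foldl (fun g y => sweepCell_gle board n g x y) _ g) _ g

lemma sweepCell_shape {board : List (List Int)} {n : Nat} {g : List (List Bool)} {x y : Nat}
    (hs : Shape n g) : Shape n (sweepCell board n g x y) := by
  simp only [sweepCell]
  split
  · split <;> split <;> first
      | exact shape_set2 (shape_set2 hs _ _) _ _
      | exact shape_set2 hs _ _
      | exact hs
  · exact hs

lemma sweep_shape {board : List (List Int)} {n : Nat} {g : List (List Bool)}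
    (hs : Shape n g) : Shape n (sweep board n g) := by
  exact foldl_preserve
    (fun g x hg => foldl_preserve (fun g y hg => sweepCell_shape hg) _ g hg) _ g hs

def SubF (board : List (List Int)) (n : Nat) (g : List (List Bool)) : Prop :=
  ∀ a b, get2 g a b = true → ReachF board n (a, b)

lemma sweepCell_subF {board : List (List Int)} {n : Nat} {g : List (List Bool)} {x y : Nat}
    (h : Shape n g ∧ SubF board n g) :
    Shape n (sweepCell board n g x y) ∧ SubF board n (sweepCell board n g x y) := by
  obtain ⟨hs, hsub⟩ := h
  refine ⟨sweepCell_shape hs, ?_⟩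
  intro a b hab
  simp only [sweepCell] at hab
  by_cases hg : get2 g x y = true
  · rw [if_pos hg] at hab
    obtain ⟨hx, hy⟩ := get2_shape_lt hs hg
    have hreach : ReachF board n (x, y) := hsub x y hg
    have hj : ∀ a b : Nat, a < n → b < n →
        ((a : Int) = (x : Int) + getCell board x y ∧ b = y ∨
         a = x ∧ (b : Int) = (y : Int) + getCell board x y) → ReachF board n (a, b) := by
      intro a b ha hb hor
      refine Relation.ReflTransGen.tail hreach ?_
      refine ⟨hx, hy, ha, hb, ?_⟩
      rcases hor with h1 | h1
      · exact Or.inr h1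
      · exact Or.inl h1
    -- peel the two conditional set2s
    set jmp := getCell board x y with hjmp
    by_cases c2 : 0 ≤ (x : Int) + jmp ∧ (x : Int) + jmp < (n : Int)
    · rw [if_pos c2] at hab
      rcases get2_set2_cases hab with ⟨rfl, rfl⟩ | hab1
      · refine hj _ _ ?_ ?_ (Or.inl ⟨?_, rfl⟩) <;> omega
      · by_cases c1 : 0 ≤ (y : Int) + jmp ∧ (y : Int) + jmp < (n : Int)
        · rw [if_pos c1] at hab1
          rcases get2_set2_cases hab1 with ⟨rfl, rfl⟩ | hab2
          · refine hj _ _ hx ?_ (Or.inr ⟨rfl, ?_⟩) <;> omega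
          · exact hsub a b hab2
        · rw [if_neg c1] at hab1; exact hsub a b hab1
    · rw [if_neg c2] at hab
      by_cases c1 : 0 ≤ (y : Int) + jmp ∧ (y : Int) + jmp < (n : Int)
      · rw [if_pos c1] at hab
        rcases get2_set2_cases hab with ⟨rfl, rfl⟩ | hab2
        · refine hj _ _ hx ?_ (Or.inr ⟨rfl, ?_⟩) <;> omega
        · exact hsub a b hab2
      · rw [if_neg c1] at hab; exact hsub a b hab
  · rw [if_neg hg] at hab; exact hsub a b hab

lemma sweep_subF {board : List (List Int)} {n : Nat} {g : List (List Bool)}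
    (hs : Shape n g) (hsub : SubF board n g) : SubF board n (sweep board n g) := by
  refine (foldl_preserve
    (P := fun g => Shape n g ∧ SubF board n g)
    (f := fun gx x => (List.range n).foldl (fun gy y => sweepCell board n gy x y) gx)
    (fun gx x hg => foldl_preserve
      (P := fun g => Shape n g ∧ SubF board n g)
      (f := fun gy y => sweepCell board n gy x y)
      (fun gy y hg => sweepCell_subF hg) (List.range n) gx hg)
    (List.range n) g ⟨hs, hsub⟩).2

lemma sweepCell_marks {board : List (List Int)} {n : Nat} {g : List (List Bool)}
    (hs : Shape n g) {x y : Nat} (hg : get2 g x y = true) :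
    ∀ s, StepF board n (x, y) s → get2 (sweepCell board n g x y) s.1 s.2 = true := by
  rintro ⟨a, b⟩ ⟨hx, hy, ha, hb, hor⟩
  dsimp only at hx hy ha hb hor ⊢
  simp only [sweepCell, if_pos hg]
  set jmp := getCell board x y with hjmp
  rcases hor with ⟨h1, h2⟩ | ⟨h1, h2⟩
  · -- rightward : a = x, (b:Int) = y + jmp
    subst h1
    have c1 : 0 ≤ (y : Int) + jmp ∧ (y : Int) + jmp < (n : Int) := by omega
    rw [if_pos c1]
    have hbt : ((y : Int) + jmp).toNat = b := by omega
    rw [hbt]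
    have hmark : get2 (set2 g a b) a b = true :=
      get2_set2_self (hs.1 ▸ ha) (by rw [hs.2 a ha]; omega)
    split
    · exact get2_set2_mono hmark
    · exact hmark
  · -- downward : (a:Int) = x + jmp, b = y
    subst h2
    have c2 : 0 ≤ (x : Int) + jmp ∧ (x : Int) + jmp < (n : Int) := by omega
    rw [if_pos c2]
    have hat : ((x : Int) + jmp).toNat = a := by omega
    rw [hat]
    have hs1 : Shape n (if 0 ≤ (b : Int) + jmp ∧ (b : Int) + jmp < (n : Int)
        then set2 g x ((b : Int) + jmp).toNat else g) := by
      split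
      · exact shape_set2 hs _ _
      · exact hs
    exact get2_set2_self (by rw [hs1.1]; exact ha) (by rw [hs1.2 a ha]; omega)

lemma sweep_reaches {board : List (List Int)} {n : Nat} {g : List (List Bool)}
    (hs : Shape n g) {x y : Nat} (hx : x < n) (hy : y < n) (hg : get2 g x y = true) :
    ∀ s, StepF board n (x, y) s → get2 (sweep board n g) s.1 s.2 = true := by
  intro s hstep
  have hFg : ∀ (gx : List (List Bool)) (c : Nat),
      Gle gx ((List.range n).foldl (fun gy y => sweepCell board n gy c y) gx) :=
    fun gx c => gle_foldl (fun g y => sweepCell_gle board n g c y) _ gx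
  have hFs : ∀ (gx : List (List Bool)) (c : Nat), Shape n gx →
      Shape n ((List.range n).foldl (fun gy y => sweepCell board n gy c y) gx) :=
    fun gx c h => foldl_preserve (fun g y hg => sweepCell_shape hg) _ gx h
  rw [sweep]
  set F : List (List Bool) → Nat → List (List Bool) :=
    fun gx x => (List.range n).foldl (fun gy y => sweepCell board n gy x y) gx with hF
  obtain ⟨l1, l2, hsplit⟩ := List.append_of_mem (List.mem_range.mpr hx)
  rw [hsplit, List.foldl_append, List.foldl_cons]
  set gmid := List.foldl F g l1 with hgmid
  have hglemid : Gle g gmid := gle_foldl (f := F) (fun g c => hFg g c) l1 g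
  have hsmid : Shape n gmid := foldl_preserve (f := F) (fun g c h => hFs g c h) l1 g hs
  have hFx : F gmid x = (List.range n).foldl (fun gy y => sweepCell board n gy x y) gmid := rfl
  rw [hFx]
  obtain ⟨m1, m2, hsplit2⟩ := List.append_of_mem (List.mem_range.mpr hy)
  rw [hsplit2, List.foldl_append, List.foldl_cons]
  set gmid2 := List.foldl (fun gy y => sweepCell board n gy x y) gmid m1 with hgmid2
  have hglemid2 : Gle gmid gmid2 := gle_foldl (fun g y => sweepCell_gle board n g x y) m1 gmid
  have hsmid2 : Shape n gmid2 := foldl_preserve (fun g y hg => sweepCell_shape hg) m1 gmid hsmid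
  have hgm : get2 gmid2 x y = true := hglemid2 x y (hglemid x y hg)
  have hmarked := sweepCell_marks hsmid2 hgm s hstep
  have h1 : Gle (sweepCell board n gmid2 x y)
      (List.foldl (fun gy y => sweepCell board n gy x y) (sweepCell board n gmid2 x y) m2) :=
    gle_foldl (fun g y => sweepCell_gle board n g x y) m2 _
  have h2 := gle_foldl (f := F) (fun g c => hFg g c) l2
      (List.foldl (fun gy y => sweepCell board n gy x y) (sweepCell board n gmid2 x y) m2)
  exact h2 s.1 s.2 (h1 s.1 s.2 hmarked)

lemma iterSweep_fix (board : List (List Int)) (n : Nat) :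
    ∀ fuel g, Shape n g → n * n - (Vset n g).card < fuel →
      sweep board n (iterSweep board n fuel g) = iterSweep board n fuel g ∧
      Shape n (iterSweep board n fuel g) ∧ Gle g (iterSweep board n fuel g) ∧
      (SubF board n g → SubF board n (iterSweep board n fuel g)) := by
  intro fuel
  induction fuel with
  | zero => intro g _ h; omega
  | succ f ih =>
    intro g hs hcard
    rw [iterSweep]
    by_cases hfix : sweep board n g = g
    · rw [if_pos hfix]
      exact ⟨hfix, hs, gle_refl g, fun h => h⟩
    · simp only [if_neg hfix]
      have hgle := sweep_gle board n g
      have hs' := sweep_shape (board := board) hs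
      -- the marked set grows strictly
      have hsub : Vset n g ⊂ Vset n (sweep board n g) := by
        constructor
        · intro p hp
          rw [Vset_mem] at hp ⊢
          exact ⟨hp.1, hp.2.1, hgle p.1 p.2 hp.2.2⟩
        · intro hcontra
          apply hfix
          apply grid_ext hs' hs
          intro a b ha hb
          cases hgb : get2 g a b
          · cases hsb : get2 (sweep board n g) a b
            · rfl
            · have : (a, b) ∈ Vset n g := hcontra (Vset_mem.mpr ⟨ha, hb, hsb⟩)
              rw [Vset_mem] at this
              rw [this.2.2] at hgb; exact absurd hgb (by simp)
          · rw [hgle a b hgb]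
      have hlt : (Vset n g).card < (Vset n (sweep board n g)).card := Finset.card_lt_card hsub
      have hle := Vset_card_le n (sweep board n g)
      obtain ⟨h1, h2, h3, h4⟩ := ih (sweep board n g) hs' (by omega)
      exact ⟨h1, h2, gle_trans hgle h3, fun hsubf => h4 (sweep_subF hs hsubf)⟩

lemma reachF_imp_reach {board : List (List Int)} {n : Nat}
    (h : ReachF board n (n - 1, n - 1)) : Reach board n (n - 1, n - 1) := by
  have aux : ∀ q, ReachF board n q → Reach board n q ∨ Reach board n (n - 1, n - 1) := by
    intro q hq
    induction hq with
    | refl => exact Or.inl Relation.ReflTransGen.refl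
    | tail hab hbc ih =>
      rcases ih with ih | ih
      · rename_i b c
        by_cases hb : b = (n - 1, n - 1)
        · exact Or.inr (hb ▸ ih)
        · obtain ⟨s1, s2, s3, s4, s5⟩ := hbc
          exact Or.inl (Relation.ReflTransGen.tail ih ⟨s1, s2, s3, s4, hb, s5⟩)
      · exact Or.inr ih
  rcases aux _ h with h' | h' <;> exact h'

lemma reach_imp_reachF {board : List (List Int)} {n : Nat} {q : Nat × Nat}
    (h : Reach board n q) : ReachF board n q := by
  induction h with
  | refl => exact Relation.ReflTransGen.refl
  | tail hab hbc ih =>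
    obtain ⟨s1, s2, s3, s4, _, s6⟩ := hbc
    exact Relation.ReflTransGen.tail ih ⟨s1, s2, s3, s4, s6⟩

lemma sweep_reaches' {board : List (List Int)} {n : Nat} {g : List (List Bool)}
    (hs : Shape n g) {p : Nat × Nat} (h1 : p.1 < n) (h2 : p.2 < n)
    (hg : get2 g p.1 p.2 = true) :
    ∀ s, StepF board n p s → get2 (sweep board n g) s.1 s.2 = true := by
  obtain ⟨x, y⟩ := p
  exact sweep_reaches hs h1 h2 hg

lemma altB_correct (board : List (List Int)) (hn : 0 < board.length) :
    (can_reach_goal_alt board = true ↔ Reach board board.length (board.length - 1, board.length - 1)) := by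
  rw [can_reach_goal_alt]
  set n := board.length with hnn
  set init := set2 (mkGrid n) 0 0 with hinit
  have hsinit : Shape n init := shape_set2 (shape_mkGrid n) 0 0
  have hstart : get2 init 0 0 = true := by
    rw [hinit]
    exact get2_set2_self (by simp [mkGrid]; omega)
      (by rw [(shape_mkGrid n).2 0 hn]; omega)
  obtain ⟨hfix, hshape, hgle, hsubf⟩ :=
    iterSweep_fix board n (n * n + 1) init hsinit (by omega)
  set fixg := iterSweep board n (n * n + 1) init with hfg
  have hsubinit : SubF board n init := by
    intro a b hab
    rcases get2_set2_cases hab with ⟨rfl, rfl⟩ | hmk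
    · exact Relation.ReflTransGen.refl
    · rw [get2_mkGrid] at hmk; exact absurd hmk (by simp)
  have hsubfix : SubF board n fixg := hsubf hsubinit
  constructor
  · intro h
    exact reachF_imp_reach (hsubfix (n - 1) (n - 1) h)
  · intro h
    have hclosed : ∀ q, ReachF board n q → get2 fixg q.1 q.2 = true := by
      intro q hq
      induction hq with
      | refl => exact hgle 0 0 hstart
      | tail hab hbc ih =>
        have : get2 (sweep board n fixg) _ _ = true :=
          sweep_reaches' hshape hbc.1 hbc.2.1 ih _ hbc
        rwa [hfix] at this
    exact hclosed _ (reach_imp_reachF h)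

lemma canA_correct (board : List (List Int)) (hn : 0 < board.length) :
    (can_reach_goal board = true ↔ Reach board board.length (board.length - 1, board.length - 1)) := by
  rw [can_reach_goal]
  set n := board.length with hnn
  set init := set2 (mkGrid n) 0 0 with hinit
  have hsmk := shape_mkGrid n
  have hsinit : Shape n init := shape_set2 hsmk 0 0
  have hstart : get2 init 0 0 = true := by
    rw [hinit]
    exact get2_set2_self (by rw [hsmk.1]; omega) (by rw [hsmk.2 0 hn]; omega)
  have hvmk : Vset n (mkGrid n) = ∅ := by
    ext p
    rw [Vset_mem]
    simp [get2_mkGrid]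
  have hcard : (Vset n init).card = 1 := by
    rw [hinit, Vset_set2 hsmk hn hn, hvmk]
    simp
  have hinitcases : ∀ p : Nat × Nat, get2 init p.1 p.2 = true → p = (0, 0) := by
    intro p hp
    rcases get2_set2_cases hp with ⟨h1, h2⟩ | h
    · exact Prod.ext h1 h2
    · rw [get2_mkGrid] at h; exact absurd h (by simp)
  have hinv : InvA board n [(0, 0)] init := by
    refine ⟨hsinit, hstart, ?_, ?_, ?_⟩
    · intro p hp
      rcases List.mem_singleton.mp hp with rfl
      exact hstart
    · intro p hp
      rw [hinitcases p hp]
      exact Relation.ReflTransGen.refl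
    · intro p hp hpq
      exact absurd (by rw [hinitcases p hp]; exact List.mem_singleton.mpr rfl) hpq
  have hsq : 1 ≤ n * n := Nat.mul_le_mul hn hn
  refine bfsA_correct board n hn (2 * n * n + 2) [(0, 0)] init hinv ?_
  rw [hcard]
  have hl : ([((0 : Nat), (0 : Nat))]).length = 1 := rfl
  have hr : 2 * n * n = 2 * (n * n) := by ring
  omega

-- ===== VERDICT (by name: the statement is the Claim_ definition above) =====
theorem can_reach_goal_spec : Claim_equal_can_reach_goal := by
  intro board _ hpre
  have hn : 0 < board.length := by
    cases board with
    | nil => exact absurd rfl hpre.1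
    | cons a l => simp
  have h1 := canA_correct board hn
  have h2 := altB_correct board hn
  show can_reach_goal board = can_reach_goal_alt board
  cases hA : can_reach_goal board <;> cases hB : can_reach_goal_alt board <;> simp_all
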